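-- pv_equiv track=rewrite | github.com/rmejia4209/Advent-of-Code-2024 | Day_5/sol.py | separate_sequences
-- ===== SOURCE A (Python) =====
-- def is_valid(num: str, rules: dict[str, list[str]], pages: list[str]) -> bool:
--     """Returns true if no page in pages is found in rules[num]"""
--     for page in pages:
--         if page in rules.get(num, []):
--             return False
--     return True
--
-- def separate_sequences(
--     data: list[list[str]], rules: dict[str, list[str]]
-- ) -> tuple[list[list[str]], list[list[str]]]:
--     """Separates the valid sequences from invalid sequences"""
--     valid = []
--     invalid = []
--
--     for manual in data:
--         placed = False
--         for idx, page in enumerate(manual):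
--             if not is_valid(page, rules, manual[:idx]):
--                 invalid.append(manual)
--                 placed = True
--                 break
--         if not placed:
--             valid.append(manual)
--     return valid, invalid
-- ===== SOURCE B (Python) =====
-- def separate_sequences(data, rules):
--     """Separates the valid sequences from invalid sequences"""
--     valid = []
--     invalid = []
--     for manual in data:
--         pos = {}
--         for i, p in enumerate(manual):
--             if p not in pos:
--                 pos[p] = i
--         n = len(manual)
--         bad = any(pos.get(s, n) < j
--                   for j, num in enumerate(manual)
--                   for s in rules.get(num, []))
--         (invalid if bad else valid).append(manual)
--     return valid, invalid
-- ===== Notes on version B (the rewrite author's own statement) =====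
-- stated objective: alternative
-- what changed: Instead of re-scanning the prefix manual[:idx] for every page, B builds a first-occurrence position map per manual once and decides validity by a single pass over each page's rule successors, comparing recorded positions.
import Mathlib
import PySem

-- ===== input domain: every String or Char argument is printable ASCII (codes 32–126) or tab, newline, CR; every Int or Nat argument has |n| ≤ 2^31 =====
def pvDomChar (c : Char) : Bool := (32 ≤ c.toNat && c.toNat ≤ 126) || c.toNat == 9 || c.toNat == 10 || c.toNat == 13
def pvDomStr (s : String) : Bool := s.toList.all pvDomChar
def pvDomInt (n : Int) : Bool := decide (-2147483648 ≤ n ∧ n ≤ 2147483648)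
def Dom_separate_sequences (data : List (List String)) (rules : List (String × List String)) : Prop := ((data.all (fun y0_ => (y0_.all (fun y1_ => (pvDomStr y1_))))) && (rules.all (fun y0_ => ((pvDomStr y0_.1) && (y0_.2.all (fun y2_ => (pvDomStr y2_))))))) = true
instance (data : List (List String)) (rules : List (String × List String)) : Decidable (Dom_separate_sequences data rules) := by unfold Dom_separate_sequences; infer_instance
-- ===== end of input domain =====

-- One honest line: B replaces A's per-index prefix rescans with a first-occurrence
-- position map built once per manual, then a single pass over the rule successors (alternative).

-- ===== PORT A =====
-- is_valid(num, rules, pages): scan pages, return False on first page found in rules.get(num, [])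
def is_valid (num : String) (rules : List (String × List String)) (pages : List String) : Bool :=
  match pages with
  | [] => true
  | page :: rest =>
    if ((PySem.Dict.mk rules).getD num []).contains page then false
    else is_valid num rules rest

-- the inner 'for idx, page in enumerate(manual): if not is_valid(...): ... break' loop:
-- returns true iff the manual gets placed into invalid
def pvScanA (rules : List (String × List String)) (manual : List String)
    (pairs : List (Int × String)) : Bool :=
  match pairs with
  | [] => false
  | (idx, page) :: rest =>
    if !(is_valid page rules (PySem.List.slice manual none (some idx))) then true
    else pvScanA rules manual rest

def separate_sequences (data : List (List String)) (rules : List (String × List String)) :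
    List (List String) × List (List String) :=
  data.foldl
    (fun acc manual =>
      if pvScanA rules manual (PySem.List.enumerate manual 0) then
        (acc.1, acc.2 ++ [manual])
      else
        (acc.1 ++ [manual], acc.2))
    ([], [])

-- ===== PORT B =====
-- pos = {}; for i, p in enumerate(manual): if p not in pos: pos[p] = i
def pvBuildPos (manual : List String) : PySem.Dict String Int :=
  (PySem.List.enumerate manual 0).foldl
    (fun d ip => if d.contains ip.2 then d else d.insert ip.2 ip.1)
    PySem.Dict.empty

-- bad = any(pos.get(s, n) < j for j, num in enumerate(manual) for s in rules.get(num, []))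
def pvBadB (rules : List (String × List String)) (manual : List String) : Bool :=
  let pos := pvBuildPos manual
  let n : Int := manual.length
  (PySem.List.enumerate manual 0).any
    (fun jp => ((PySem.Dict.mk rules).getD jp.2 []).any (fun s => pos.getD s n < jp.1))

def separate_sequences_alt (data : List (List String)) (rules : List (String × List String)) :
    List (List String) × List (List String) :=
  data.foldl
    (fun acc manual =>
      if pvBadB rules manual then
        (acc.1, acc.2 ++ [manual])
      else
        (acc.1 ++ [manual], acc.2))
    ([], [])

-- ===== PRECONDITION & SPEC =====
def Spec_separate_sequences (data : List (List String)) (rules : List (String × List String)) (out : List (List String) × List (List String)) : Prop := out = separate_sequences_alt data rules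
instance (data : List (List String)) (rules : List (String × List String)) (out : List (List String) × List (List String)) : Decidable (Spec_separate_sequences data rules out) := by unfold Spec_separate_sequences; infer_instance

-- ===== CLAIM (what is proved, stated in full; the proofs are below) =====
def Claim_equal_separate_sequences : Prop := ∀ (data : List (List String)) (rules : List (String × List String)), Dom_separate_sequences data rules → Spec_separate_sequences data rules (separate_sequences data rules)

-- ===== LEMMAS AND PROOFS =====

-- first index of s in l (proof-side reference function)
def pvFirst (l : List String) (s : String) : Option Nat :=
  match l with
  | [] => none
  | a :: t => if a = s then some 0 else (pvFirst t s).map (· + 1)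

theorem mem_take_iff_pvFirst (l : List String) (s : String) (k : Nat) :
    s ∈ l.take k ↔ ∃ i, pvFirst l s = some i ∧ i < k := by
  induction l generalizing k with
  | nil => simp [pvFirst]
  | cons a t ih =>
    cases k with
    | zero => simp
    | succ k =>
      by_cases h : a = s
      · subst h; simp [pvFirst]
      · simp only [List.take_succ_cons, List.mem_cons, pvFirst, h, if_false, ih]
        constructor
        · rintro (rfl | ⟨i, hi, hik⟩)
          · exact absurd rfl h
          · exact ⟨i + 1, by simp [hi], by omega⟩
        · rintro ⟨i, hi, hik⟩
          obtain ⟨j, hj, hji⟩ := Option.map_eq_some_iff.mp hi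
          exact Or.inr ⟨j, hj, by omega⟩

theorem pvBuildPos_aux (manual : List String) (st : Int) (d : PySem.Dict String Int) (s : String) :
    ((PySem.List.enumerate manual st).foldl
      (fun d ip => if d.contains ip.2 then d else d.insert ip.2 ip.1) d).get? s =
    (if d.contains s then d.get? s
     else (pvFirst manual s).map (fun (i : Nat) => st + (i : Int))) := by
  induction manual generalizing st d with
  | nil =>
    simp only [PySem.List.enumerate_nil, List.foldl_nil, pvFirst, Option.map_none]
    split
    · rfl
    · next h =>
      exact (PySem.Dict.get?_eq_none_iff_contains d s).mpr (by simpa using h)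
  | cons a t ih =>
    rw [PySem.List.enumerate_cons]
    simp only [List.foldl_cons]
    by_cases hs : s = a
    · subst hs
      cases hc : d.contains s
      · rw [if_neg Bool.false_ne_true, if_neg Bool.false_ne_true, ih,
          if_pos (PySem.Dict.contains_insert_self d s st), PySem.Dict.get?_insert_self]
        simp [pvFirst]
      · rw [if_pos rfl, if_pos rfl, ih, if_pos hc]
    · cases hc : d.contains a
      · rw [if_neg Bool.false_ne_true, ih, PySem.Dict.contains_insert]
        have hbs : (s == a) = false := by simp [hs]
        rw [hbs, Bool.false_or, PySem.Dict.get?_insert_of_ne d st hs]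
        by_cases hds : d.contains s = true
        · rw [if_pos hds, if_pos hds]
        · rw [if_neg hds, if_neg hds]
          simp only [pvFirst, if_neg (Ne.symm hs)]
          cases hf : pvFirst t s
          · simp
          · simp only [Option.map_some, Option.some.injEq]
            omega
      · rw [if_pos rfl, ih]
        by_cases hds : d.contains s = true
        · rw [if_pos hds, if_pos hds]
        · rw [if_neg hds, if_neg hds]
          simp only [pvFirst, if_neg (Ne.symm hs)]
          cases hf : pvFirst t s
          · simp
          · simp only [Option.map_some, Option.some.injEq]
            omega

theorem pvBuildPos_get? (manual : List String) (s : String) :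
    (pvBuildPos manual).get? s = (pvFirst manual s).map (fun (i : Nat) => (i : Int)) := by
  rw [pvBuildPos, pvBuildPos_aux]
  simp

-- the recorded first-occurrence position is below k exactly when s occurs in the k-prefix
theorem pos_lt_iff_mem_take (manual : List String) (s : String) (k : Nat)
    (hk : k ≤ manual.length) :
    ((pvBuildPos manual).getD s (manual.length : Int) < (k : Int)) ↔ s ∈ manual.take k := by
  rw [PySem.Dict.getD_eq_get?_getD, pvBuildPos_get?, mem_take_iff_pvFirst]
  cases h : pvFirst manual s
  · simp only [Option.map_none, Option.getD_none]
    constructor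
    · intro hlt; exfalso; omega
    · rintro ⟨i, hi, -⟩; simp at hi
  · next i =>
    simp only [Option.map_some, Option.getD_some]
    constructor
    · intro hlt; exact ⟨i, rfl, by omega⟩
    · rintro ⟨j, hij, hj⟩
      obtain rfl : i = j := by injection hij
      omega

theorem is_valid_eq (num : String) (rules : List (String × List String)) (pages : List String) :
    is_valid num rules pages = !(pages.any (fun p => ((PySem.Dict.mk rules).getD num []).contains p)) := by
  induction pages with
  | nil => simp [is_valid]
  | cons p rest ih =>
    by_cases h : ((PySem.Dict.mk rules).getD num []).contains p = true <;>
      simp [is_valid, ih]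

theorem pvScanA_eq_any (rules : List (String × List String)) (manual : List String)
    (pairs : List (Int × String)) :
    pvScanA rules manual pairs =
      pairs.any (fun ip =>
        (PySem.List.slice manual none (some ip.1)).any
          (fun p => ((PySem.Dict.mk rules).getD ip.2 []).contains p)) := by
  induction pairs with
  | nil => rfl
  | cons ip rest ih =>
    obtain ⟨idx, page⟩ := ip
    simp only [pvScanA, is_valid_eq, Bool.not_not, List.any_cons, ih]
    cases h : (PySem.List.slice manual none (some idx)).any
        (fun p => ((PySem.Dict.mk rules).getD page []).contains p)
    · simp
    · simp

-- per-manual agreement of the two invalidity decisions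
theorem bad_eq (rules : List (String × List String)) (manual : List String) :
    pvScanA rules manual (PySem.List.enumerate manual 0) = pvBadB rules manual := by
  rw [Bool.eq_iff_iff, pvScanA_eq_any]
  show _ ↔ ((PySem.List.enumerate manual 0).any
      (fun jp => ((PySem.Dict.mk rules).getD jp.2 []).any
        (fun s => decide ((pvBuildPos manual).getD s (manual.length : Int) < jp.1)))) = true
  simp only [List.any_eq_true, PySem.List.mem_enumerate_iff]
  constructor
  · rintro ⟨ip, ⟨k, hk, rfl⟩, hin⟩
    have hin' : ∃ p ∈ PySem.List.slice manual none (some (0 + (k : Int))),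
        ((PySem.Dict.mk rules).getD manual[k] []).contains p = true := hin
    rw [show (0 : Int) + (k : Int) = ((k : Int)) from zero_add _,
        PySem.List.slice_to manual (Int.natCast_nonneg k), Int.toNat_natCast] at hin'
    obtain ⟨p, hp, hpr⟩ := hin'
    refine ⟨((0 : Int) + (k : Int), manual[k]), ⟨k, hk, rfl⟩, ?_⟩
    show ∃ s ∈ (PySem.Dict.mk rules).getD manual[k] [],
        decide ((pvBuildPos manual).getD s (manual.length : Int) < 0 + (k : Int)) = true
    refine ⟨p, List.contains_iff_mem.mp hpr, ?_⟩
    rw [decide_eq_true_eq, zero_add, pos_lt_iff_mem_take manual p k hk.le]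
    exact hp
  · rintro ⟨ip, ⟨k, hk, rfl⟩, hin⟩
    have hin' : ∃ s ∈ (PySem.Dict.mk rules).getD manual[k] [],
        decide ((pvBuildPos manual).getD s (manual.length : Int) < 0 + (k : Int)) = true := hin
    obtain ⟨p, hp, hlt⟩ := hin'
    rw [decide_eq_true_eq, zero_add, pos_lt_iff_mem_take manual p k hk.le] at hlt
    refine ⟨((0 : Int) + (k : Int), manual[k]), ⟨k, hk, rfl⟩, ?_⟩
    show ∃ x ∈ PySem.List.slice manual none (some (0 + (k : Int))),
        ((PySem.Dict.mk rules).getD manual[k] []).contains x = true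
    rw [show (0 : Int) + (k : Int) = ((k : Int)) from zero_add _,
        PySem.List.slice_to manual (Int.natCast_nonneg k), Int.toNat_natCast]
    exact ⟨p, hlt, List.contains_iff_mem.mpr hp⟩

-- ===== VERDICT (by name: the statement is the Claim_ definition above) =====
theorem separate_sequences_spec : Claim_equal_separate_sequences := by
  intro data rules _
  unfold Spec_separate_sequences separate_sequences separate_sequences_alt
  simp only [bad_eq]
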